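-- pv_equiv track=rewrite | github.com/GAVB-SERVICOS/Gumly | gumly/airflow_utils.py | getSlotsIntervals
-- ===== SOURCE A (Python) =====
-- def getSlotsIntervals(groups: int = 2) -> list:
--     """
--     This method split the 24 hours in slots of intervals based in the number of the groups.
--     Args:
--         groups (int, optional): Define the number of time intervals. Defaults to 2.
--     Returns:
--         list: List of time intervals.
--     """
--     import math
--     hours = 24
--     if groups > hours or groups < 1:
--         raise Exception(
--             f'Number of groups must be less than {hours} and bigger than 0')
--     base = math.floor(hours / groups)
--     slots = []
--     slotsRange = range(groups)
--     for i in slotsRange: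
--         slotIni = base * i
--         slotEnd = int(slotIni + base - 1)
--         if i == max(slotsRange):
--             slotEnd = slotEnd + (hours - slotEnd) - 1
--         slot = [f'{str(slotIni).zfill(2)}00',
--                 f'{str(slotEnd).zfill(2)}59']
--         slots.append(slot)
--     return slots
-- ===== SOURCE B (Python) =====
-- import math
--
-- def getSlotsIntervals(groups: int = 2) -> list:
--     hours = 24
--     if groups > hours or groups < 1:
--         raise Exception(
--             f'Number of groups must be less than {hours} and bigger than 0')
--     base = math.floor(hours / groups)
--     starts = [base * i for i in range(groups)]
--     ends = starts[1:] + [hours]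
--     return [[f'{str(s).zfill(2)}00', f'{str(e - 1).zfill(2)}59']
--             for s, e in zip(starts, ends)]
-- ===== Notes on version B (the rewrite author's own statement) =====
-- stated objective: simpler
-- what changed: B computes the list of slot start boundaries once and pairs consecutive boundaries (with 24 appended as the final end) in a comprehension, instead of A's single accumulating loop with a special-cased last iteration detected via max(range); no faster, same O(groups) cost.
import Mathlib
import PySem

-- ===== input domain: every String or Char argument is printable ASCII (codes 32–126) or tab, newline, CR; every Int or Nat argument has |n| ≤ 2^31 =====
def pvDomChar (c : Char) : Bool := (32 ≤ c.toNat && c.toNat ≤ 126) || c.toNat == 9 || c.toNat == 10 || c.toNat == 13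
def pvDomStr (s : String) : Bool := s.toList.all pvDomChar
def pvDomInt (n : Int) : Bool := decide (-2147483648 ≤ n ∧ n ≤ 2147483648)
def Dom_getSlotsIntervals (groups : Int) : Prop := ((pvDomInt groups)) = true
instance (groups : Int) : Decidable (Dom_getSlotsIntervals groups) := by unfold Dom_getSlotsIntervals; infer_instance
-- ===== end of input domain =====

-- B builds the slot start boundaries once and pairs consecutive boundaries (appending 24 as the
-- final end) instead of A's accumulating loop with a special-cased last iteration: simpler, same cost.

-- ===== PORT A =====
-- math.floor(hours / groups) is exact as integer floor division for 1 ≤ groups ≤ 24 (24/groups is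
-- computed without a rounding step crossing an integer); the raise branch is excluded by Pre_.
def getSlotsIntervals (groups : Int) : List (List String) :=
  if groups > 24 ∨ groups < 1 then []  -- Python raises Exception here; outside Pre_
  else
    let base := PySem.Int.floordiv 24 groups
    let slotsRange := PySem.List.pyRange 0 groups 1
    slotsRange.foldl (fun slots i =>
      let slotIni := base * i
      let slotEnd0 := slotIni + base - 1
      let slotEnd := if PySem.List.max? slotsRange (fun x => x) = some i
                     then slotEnd0 + (24 - slotEnd0) - 1 else slotEnd0
      slots ++ [[PySem.Str.zfill (PySem.Int.toStr slotIni) 2 ++ "00",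
                 PySem.Str.zfill (PySem.Int.toStr slotEnd) 2 ++ "59"]]) []

-- ===== PORT B =====
def getSlotsIntervals_alt (groups : Int) : List (List String) :=
  if groups > 24 ∨ groups < 1 then []  -- Python raises Exception here; outside Pre_
  else
    let base := PySem.Int.floordiv 24 groups
    let starts := (PySem.List.pyRange 0 groups 1).map (fun i => base * i)
    let ends := starts.drop 1 ++ [24]  -- starts[1:] + [hours]
    (starts.zip ends).map (fun se =>
      [PySem.Str.zfill (PySem.Int.toStr se.1) 2 ++ "00",
       PySem.Str.zfill (PySem.Int.toStr (se.2 - 1)) 2 ++ "59"])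

-- ===== PRECONDITION & SPEC =====
-- Pre_ excludes exactly the inputs where A raises Exception (groups > 24 or groups < 1).
def Pre_getSlotsIntervals (groups : Int) : Prop := 1 ≤ groups ∧ groups ≤ 24
instance (groups : Int) : Decidable (Pre_getSlotsIntervals groups) := by unfold Pre_getSlotsIntervals; infer_instance
def pvWitness_getSlotsIntervals : Int := 2

def Spec_getSlotsIntervals (groups : Int) (out : List (List String)) : Prop := out = getSlotsIntervals_alt groups
instance (groups : Int) (out : List (List String)) : Decidable (Spec_getSlotsIntervals groups out) := by unfold Spec_getSlotsIntervals; infer_instance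

-- ===== CLAIM (what is proved, stated in full; the proofs are below) =====
def Claim_equal_getSlotsIntervals : Prop := ∀ (groups : Int), Dom_getSlotsIntervals groups → Pre_getSlotsIntervals groups → Spec_getSlotsIntervals groups (getSlotsIntervals groups)

-- ===== LEMMAS AND PROOFS =====

-- ===== VERDICT (by name: the statement is the Claim_ definition above) =====
theorem getSlotsIntervals_spec : Claim_equal_getSlotsIntervals := by
  intro groups _ hpre
  obtain ⟨h1, h2⟩ := hpre
  unfold Spec_getSlotsIntervals
  interval_cases groups <;> decide
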